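-- pv_equiv track=rewrite | github.com/onitonitonito/k_mooc_reboot | package_i/code_morse_orig.py | decoding_sentence
-- ===== SOURCE A (Python) =====
-- def get_morse_code_dict():
--     morse_code = {
--         "A": ".-",      "B": "-...",    "C": "-.-.",   "D": "-..",  "E": ".",
--         "F": "..-.",    "G": "--.",     "H": "....",   "I": "..",   "J": ".---",
--         "K": "-.-",     "L": ".-..",    "M": "--",     "N": "-.",   "O": "---",
--         "P": ".--.",    "Q": "--.-",    "R": ".-.",    "S": "...",  "T": "-",
--         "U": "..-",     "V": "...-",    "W": ".--",    "X": "-..-", "Y": "-.--",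
--         "Z": "--..",
--         "0":"-----",    "1":".----",    "2":"..---",    "3":"...--", "4":"....-",
--         "5":".....",    "6":"-....",    "7":"--...",    "8":"---...","9":"----.",
--     }
--     return morse_code
--
-- def decoding_character(morse_character):
--     morse_code_dict = get_morse_code_dict()
--     for key, value in morse_code_dict.items():
--         if value == morse_character:
--             return key
--
-- def decoding_sentence(morse_sentence):
--     result = ''
--     string = morse_sentence.replace('  ', ' * ')
--     for i in string.split(' '):
--         if i == '*':
--             result += ' '
--             continue
--         result += decoding_character(i)
--     return result
-- ===== SOURCE B (Python) =====
-- def decoding_sentence(morse_sentence):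
--     # Dichotomic (binary-tree) morse decoding: walk an implicit heap, '.' = left
--     # child, '-' = right child, and read the letter off a table keyed by the
--     # final heap index -- no scan of the 36-entry morse dict per letter.
--     # Words are split on two spaces, letter codes inside a word on one space.
--     TREE = {1: 'E', 2: 'T', 3: 'I', 4: 'A', 5: 'N', 6: 'M', 7: 'S', 8: 'U',
--             9: 'R', 10: 'W', 11: 'D', 12: 'K', 13: 'G', 14: 'O', 15: 'H',
--             16: 'V', 17: 'F', 19: 'L', 21: 'P', 22: 'J', 23: 'B', 24: 'X',
--             25: 'C', 26: 'Y', 27: 'Z', 28: 'Q', 31: '5', 32: '4', 34: '3',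
--             38: '2', 46: '1', 47: '6', 55: '7', 61: '9', 62: '0', 119: '8'}
--     STEP = {'.': 1, '-': 2}
--     out = []
--     for word in morse_sentence.split('  '):
--         letters = []
--         for code in word.split(' '):
--             i = 0
--             for c in code:
--                 i = 2 * i + STEP[c]
--             letters.append(TREE[i])
--         out.append(''.join(letters))
--     return ' '.join(out)
-- ===== Notes on version B (the rewrite author's own statement) =====
-- stated objective: faster
-- what changed: B replaces A's ' * ' sentinel replace, flat split and per-letter linear scan of the morse dict by a two-level split (words on two spaces, codes on one) and a dichotomic decode: each code is walked as a path in an implicit binary heap ('.' = left child, '-' = right) and the letter is looked up by the final heap index, so the 36-entry dict scan per letter disappears.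
-- outside the precondition, e.g. on decoding_sentence('.- * .-'): A returns 'A A', B raises KeyError; on decoding_sentence('*'): A returns ' ', B raises KeyError; on decoding_sentence(' * '): A raises TypeError, B raises KeyError
import Mathlib
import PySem

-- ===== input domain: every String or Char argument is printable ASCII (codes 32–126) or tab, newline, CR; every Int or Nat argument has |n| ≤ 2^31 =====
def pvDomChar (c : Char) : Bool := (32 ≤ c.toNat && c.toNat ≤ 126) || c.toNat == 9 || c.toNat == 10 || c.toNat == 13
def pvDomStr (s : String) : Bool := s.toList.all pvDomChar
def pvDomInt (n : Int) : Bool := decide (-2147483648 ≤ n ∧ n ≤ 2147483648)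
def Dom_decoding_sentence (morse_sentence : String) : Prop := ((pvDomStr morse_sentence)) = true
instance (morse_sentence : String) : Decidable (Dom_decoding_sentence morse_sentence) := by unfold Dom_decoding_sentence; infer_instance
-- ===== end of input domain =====

-- B decodes by a two-level split (words on "  ", codes on " ") and a dichotomic binary-tree
-- lookup ('.' = left, '-' = right, letter read off a table keyed by the final heap index), replacing A's ' * ' sentinel
-- replace, flat split and per-letter linear scan of the morse dict.

-- ===== PORT A =====
def pvMorsePairs : List (List Char × List Char) := [
  (['A'], ['.', '-']), (['B'], ['-', '.', '.', '.']), (['C'], ['-', '.', '-', '.']),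
  (['D'], ['-', '.', '.']), (['E'], ['.']), (['F'], ['.', '.', '-', '.']),
  (['G'], ['-', '-', '.']), (['H'], ['.', '.', '.', '.']), (['I'], ['.', '.']),
  (['J'], ['.', '-', '-', '-']), (['K'], ['-', '.', '-']), (['L'], ['.', '-', '.', '.']),
  (['M'], ['-', '-']), (['N'], ['-', '.']), (['O'], ['-', '-', '-']),
  (['P'], ['.', '-', '-', '.']), (['Q'], ['-', '-', '.', '-']), (['R'], ['.', '-', '.']),
  (['S'], ['.', '.', '.']), (['T'], ['-']), (['U'], ['.', '.', '-']),
  (['V'], ['.', '.', '.', '-']), (['W'], ['.', '-', '-']), (['X'], ['-', '.', '.', '-']),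
  (['Y'], ['-', '.', '-', '-']), (['Z'], ['-', '-', '.', '.']),
  (['0'], ['-', '-', '-', '-', '-']), (['1'], ['.', '-', '-', '-', '-']),
  (['2'], ['.', '.', '-', '-', '-']), (['3'], ['.', '.', '.', '-', '-']),
  (['4'], ['.', '.', '.', '.', '-']), (['5'], ['.', '.', '.', '.', '.']),
  (['6'], ['-', '.', '.', '.', '.']), (['7'], ['-', '-', '.', '.', '.']),
  (['8'], ['-', '-', '-', '.', '.', '.']), (['9'], ['-', '-', '-', '-', '.'])]

def decoding_character (morse_character : List Char) : Option (List Char) :=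
  (pvMorsePairs.find? (fun kv => kv.2 == morse_character)).map (fun kv => kv.1)

def decoding_sentence (morse_sentence : String) : String :=
  let string := PySem.Chars.replace morse_sentence.toList [' ', ' '] [' ', '*', ' ']
  String.ofList ((PySem.Chars.splitOn string [' ']).foldl
    (fun result i =>
      if i == ['*'] then result ++ [' ']
      else result ++ (decoding_character i).getD []) [])

-- ===== PORT B =====
def pvMorseTree : PySem.Dict Int Char := PySem.Dict.ofList [((1:Int), 'E'), ((2:Int), 'T'), ((3:Int), 'I'), ((4:Int), 'A'), ((5:Int), 'N'), ((6:Int), 'M'), ((7:Int), 'S'), ((8:Int), 'U'), ((9:Int), 'R'), ((10:Int), 'W'), ((11:Int), 'D'), ((12:Int), 'K'), ((13:Int), 'G'), ((14:Int), 'O'), ((15:Int), 'H'), ((16:Int), 'V'), ((17:Int), 'F'), ((19:Int), 'L'), ((21:Int), 'P'), ((22:Int), 'J'), ((23:Int), 'B'), ((24:Int), 'X'), ((25:Int), 'C'), ((26:Int), 'Y'), ((27:Int), 'Z'), ((28:Int), 'Q'), ((31:Int), '5'), ((32:Int), '4'), ((34:Int), '3'), ((38:Int), '2'), ((46:Int),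 '1'), ((47:Int), '6'), ((55:Int), '7'), ((61:Int), '9'), ((62:Int), '0'), ((119:Int), '8')]

-- one letter: walk the implicit heap, then look up the table
def pvStep : PySem.Dict Char Int := PySem.Dict.ofList [('.', (1 : Int)), ('-', (2 : Int))]

-- STEP[c] and TREE[i]: the getD defaults stand for the KeyError cases, unreachable where Python B returns
def pvTreeDecode (code : List Char) : Char :=
  (PySem.Dict.get? pvMorseTree
    (code.foldl (fun i c => 2 * i + (PySem.Dict.get? pvStep c).getD 0) 0)).getD '?'

def decoding_sentence_alt (morse_sentence : String) : String :=
  String.ofList (PySem.Chars.join [' ']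
    ((PySem.Chars.splitOn morse_sentence.toList [' ', ' ']).map (fun word =>
      PySem.Chars.join [] ((PySem.Chars.splitOn word [' ']).map (fun code =>
        [pvTreeDecode code])))))

-- ===== PRECONDITION & SPEC =====
-- Pre_ excludes (a) inputs where A raises a TypeError (some token between spaces is not a morse
-- code, e.g. irregular spacing or an unknown code) and (b) sentences containing a literal '*',
-- where A's ' * ' sentinel replace accidentally reads the '*' as a word break while B decodes
-- the '*' as a tree step.
def Pre_decoding_sentence (morse_sentence : String) : Prop :=
  ∀ w ∈ PySem.Chars.splitOn morse_sentence.toList [' ', ' '],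
    ∀ c ∈ PySem.Chars.splitOn w [' '], c ∈ pvMorsePairs.map (fun kv => kv.2)

instance (morse_sentence : String) : Decidable (Pre_decoding_sentence morse_sentence) := by
  unfold Pre_decoding_sentence; infer_instance

def pvWitness_decoding_sentence : String := "... --- ...  - .-"

def Spec_decoding_sentence (morse_sentence : String) (out : String) : Prop := out = decoding_sentence_alt morse_sentence
instance (morse_sentence : String) (out : String) : Decidable (Spec_decoding_sentence morse_sentence out) := by unfold Spec_decoding_sentence; infer_instance

-- ===== CLAIM (what is proved, stated in full; the proofs are below) =====
def Claim_equal_decoding_sentence : Prop := ∀ (morse_sentence : String), Dom_decoding_sentence morse_sentence → Pre_decoding_sentence morse_sentence → Spec_decoding_sentence morse_sentence (decoding_sentence morse_sentence)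

-- ===== LEMMAS AND PROOFS =====

def sF (a : Char) (sp : List Char) : List Char → List (List Char)
  | [] => [[]]
  | c :: t =>
    if (a :: sp).isPrefixOf (c :: t) then [] :: sF a sp (t.drop sp.length)
    else (sF a sp t).modifyHead (c :: ·)
termination_by l => l.length
decreasing_by all_goals simp

def rF (a : Char) (sp new : List Char) : List Char → List Char
  | [] => []
  | c :: t =>
    if (a :: sp).isPrefixOf (c :: t) then new ++ rF a sp new (t.drop sp.length)
    else c :: rF a sp new t
termination_by l => l.length
decreasing_by all_goals simp

theorem sF_ne_nil (a : Char) (sp : List Char) (l : List Char) : sF a sp l ≠ [] := by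
  match l with
  | [] => simp [sF]
  | c :: t =>
    rw [sF]
    split
    · simp
    · have := sF_ne_nil a sp t
      cases h : sF a sp t with
      | nil => exact absurd h this
      | cons p ps => simp
termination_by l.length
decreasing_by simp

theorem sOn_go_eq (a : Char) (sp : List Char) :
    ∀ (fuel : Nat) (l cur acc : _), l.length < fuel →
      PySem.Chars.splitOn.go (a :: sp) fuel l cur acc
        = acc.reverse ++ (sF a sp l).modifyHead (cur.reverse ++ ·) := by
  intro fuel
  induction fuel with
  | zero => intro l cur acc h; omega
  | succ n ih =>
    intro l cur acc h
    match l with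
    | [] => simp [PySem.Chars.splitOn.go, sF]
    | c :: t =>
      rw [PySem.Chars.splitOn.go]
      by_cases hp : (a :: sp).isPrefixOf (c :: t)
      · simp only [hp, if_true]
        rw [show (c :: t).drop (a :: sp).length = t.drop sp.length by simp]
        rw [ih (t.drop sp.length) [] (cur.reverse :: acc) (by simp only [List.length_drop, List.length_cons] at h ⊢; omega)]
        rw [sF]
        simp only [hp, if_true, List.reverse_cons, List.reverse_nil, List.nil_append,
          List.append_assoc, List.singleton_append]
        cases sF a sp (t.drop sp.length) <;> simp [List.modifyHead]
      · simp only [hp]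
        rw [ih t (c :: cur) acc (by simp at h ⊢; omega)]
        rw [sF]
        simp only [hp]
        cases hs : sF a sp t with
        | nil => exact absurd hs (sF_ne_nil a sp t)
        | cons p ps => simp [List.modifyHead]

theorem sOn_eq (a : Char) (sp : List Char) (l : List Char) :
    PySem.Chars.splitOn l (a :: sp) = sF a sp l := by
  rw [PySem.Chars.splitOn, sOn_go_eq a sp (l.length + 1) l [] [] (by omega)]
  cases sF a sp l <;> simp [List.modifyHead]

theorem rF_go_eq (a : Char) (sp new : List Char) :
    ∀ (fuel : Nat) (l acc : List Char), l.length ≤ fuel →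
      PySem.Chars.replace.go (a :: sp) new fuel l acc
        = acc.reverse ++ rF a sp new l := by
  intro fuel
  induction fuel with
  | zero =>
    intro l acc h
    have : l = [] := by cases l <;> simp_all
    subst this
    simp [PySem.Chars.replace.go, rF]
  | succ n ih =>
    intro l acc h
    match l with
    | [] => simp [PySem.Chars.replace.go, rF]
    | c :: t =>
      rw [PySem.Chars.replace.go]
      by_cases hp : (a :: sp).isPrefixOf (c :: t)
      · simp only [hp, if_true]
        rw [show (c :: t).drop (a :: sp).length = t.drop sp.length by simp]
        rw [ih (t.drop sp.length) (new.reverse ++ acc)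
          (by simp only [List.length_drop, List.length_cons] at h ⊢; omega)]
        rw [rF]
        simp [hp]
      · simp only [hp]
        rw [ih t (c :: acc) (by simp at h ⊢; omega), rF]
        simp [hp]

theorem repl_eq (a : Char) (sp new : List Char) (l : List Char) :
    PySem.Chars.replace l (a :: sp) new = rF a sp new l := by
  rw [PySem.Chars.replace]
  simp only [List.isEmpty_cons, if_false, Bool.false_eq_true]
  exact rF_go_eq a sp new l.length l [] (by omega)

def jn (sep : List Char) : List (List Char) → List Char
  | [] => []
  | [x] => x
  | x :: y :: t => x ++ sep ++ jn sep (y :: t)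

theorem join_eq_jn (sep : List Char) (l : List (List Char)) :
    PySem.Chars.join sep l = jn sep l := by
  match l with
  | [] => simp [PySem.Chars.join_nil, jn]
  | [x] => simp [PySem.Chars.join_singleton, jn]
  | x :: y :: t =>
    rw [PySem.Chars.join_cons_cons, join_eq_jn sep (y :: t)]
    simp [jn]

theorem jn_nil_flatten (l : List (List Char)) : jn [] l = l.flatten := by
  match l with
  | [] => simp [jn]
  | [x] => simp [jn]
  | x :: y :: t => rw [jn, jn_nil_flatten (y :: t)]; simp

theorem sF_join (a : Char) (sp : List Char) (l : List Char) :
    jn (a :: sp) (sF a sp l) = l := by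
  match l with
  | [] => simp [sF, jn]
  | c :: t =>
    rw [sF]
    by_cases hp : (a :: sp).isPrefixOf (c :: t)
    · have hdrop := sF_join a sp (t.drop sp.length)
      have hpre := List.isPrefixOf_iff_prefix.mp hp
      have : c :: t = (a :: sp) ++ (c :: t).drop (a :: sp).length := by
        obtain ⟨u, hu⟩ := hpre
        simp [← hu]
      simp only [hp, if_true]
      cases hs : sF a sp (t.drop sp.length) with
      | nil => exact absurd hs (sF_ne_nil a sp _)
      | cons p ps =>
        rw [jn]
        rw [hs] at hdrop
        rw [hdrop]
        conv_rhs => rw [this]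
        simp
    · simp only [hp]
      have ht := sF_join a sp t
      cases hs : sF a sp t with
      | nil => exact absurd hs (sF_ne_nil a sp _)
      | cons p ps =>
        rw [hs] at ht
        simp only [Bool.false_eq_true, if_false, List.modifyHead]
        cases ps with
        | nil => simp [jn] at ht ⊢; simp [ht]
        | cons q qs =>
          rw [jn] at ht ⊢
          conv_rhs => rw [← ht]
          simp
termination_by l.length
decreasing_by
  · simp
  · simp

-- replace lemmas (old = "  ", i.e. a = ' ', sp = [' '])
theorem rF_skip_code (new : List Char) (c r : List Char) (hc : ' ' ∉ c) :
    rF ' ' [' '] new (c ++ r) = c ++ rF ' ' [' '] new r := by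
  match c with
  | [] => simp
  | x :: t =>
    have hx : x ≠ ' ' := by intro h; exact hc (by simp [h])
    rw [List.cons_append, rF]
    have : (' ' :: [' ']).isPrefixOf (x :: (t ++ r)) = false := by
      simp [List.isPrefixOf]; intro h; exact absurd h.symm hx
    simp only [this, Bool.false_eq_true, if_false]
    rw [rF_skip_code new t r (fun h => hc (by simp [h]))]
    simp

theorem rF_single_space (new : List Char) (y : List Char) (hy : y.head? ≠ some ' ') :
    rF ' ' [' '] new (' ' :: y) = ' ' :: rF ' ' [' '] new y := by
  rw [rF]
  have : (' ' :: [' ']).isPrefixOf (' ' :: y) = false := by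
    cases y with
    | nil => simp [List.isPrefixOf]
    | cons b t =>
      simp [List.isPrefixOf]
      intro h
      exact absurd (show (b :: t).head? = some ' ' by simp; exact h.symm) hy
  simp [this]

theorem rF_double_space (new : List Char) (r : List Char) :
    rF ' ' [' '] new (' ' :: ' ' :: r) = new ++ rF ' ' [' '] new r := by
  rw [rF]
  simp [List.isPrefixOf]

theorem jn_head (c : List Char) (cs : List (List Char)) (hc : c ≠ []) (r : List Char) :
    (jn [' '] (c :: cs) ++ r).head? = c.head? := by
  match c with
  | x :: t =>
    cases cs with
    | nil => simp [jn]
    | cons q qs => rw [jn]; simp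

theorem rF_word (new : List Char) (cs : List (List Char)) (r : List Char)
    (hne : cs ≠ []) (hg : ∀ c ∈ cs, c ≠ [] ∧ ' ' ∉ c) :
    rF ' ' [' '] new (jn [' '] cs ++ r) = jn [' '] cs ++ rF ' ' [' '] new r := by
  match cs with
  | [c] =>
    rw [jn]
    exact rF_skip_code new c r (hg c (by simp)).2
  | c :: c' :: t =>
    rw [jn]
    have h1 := (hg c (by simp))
    have h2 := (hg c' (by simp))
    rw [List.append_assoc, List.append_assoc]
    rw [rF_skip_code new c _ h1.2]
    have hhd : ((jn [' '] (c' :: t) ++ r)).head? ≠ some ' ' := by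
      rw [jn_head c' t h2.1 r]
      cases hc' : c'.head? with
      | none => simp
      | some x =>
        have : x ∈ c' := by cases c' with | nil => simp at hc' | cons a b => simp at hc'; simp [hc']
        intro h
        simp at h
        exact h2.2 (by rw [← h]; exact this)
    rw [List.singleton_append, rF_single_space new _ hhd]
    rw [rF_word new (c' :: t) r (by simp) (fun x hx => hg x (by simp [hx]))]
    simp

theorem rF_sentence (cs0 : List (List Char)) (css : List (List (List Char)))
    (hg : ∀ cs ∈ cs0 :: css, cs ≠ [] ∧ ∀ c ∈ cs, c ≠ [] ∧ ' ' ∉ c) :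
    rF ' ' [' '] [' ', '*', ' '] (jn [' ', ' '] ((cs0 :: css).map (jn [' '])))
      = jn [' ', '*', ' '] ((cs0 :: css).map (jn [' '])) := by
  match css with
  | [] =>
    simp only [List.map_cons, List.map_nil]
    rw [jn, jn]
    have := rF_word [' ', '*', ' '] cs0 [] (hg cs0 (by simp)).1 (fun c hc => (hg cs0 (by simp)).2 c hc)
    simpa [rF] using this
  | cs1 :: t =>
    simp only [List.map_cons]
    rw [jn, jn]
    rw [List.append_assoc]
    rw [rF_word [' ', '*', ' '] cs0 _ (hg cs0 (by simp)).1 (fun c hc => (hg cs0 (by simp)).2 c hc)]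
    rw [show ([' ', ' '] : List Char) ++ jn [' ', ' '] (jn [' '] cs1 :: t.map (jn [' ']))
        = ' ' :: ' ' :: jn [' ', ' '] (jn [' '] cs1 :: t.map (jn [' '])) by simp]
    rw [rF_double_space]
    have := rF_sentence cs1 t (fun cs hcs => hg cs (by simp at hcs; rcases hcs with h | h <;> simp [h]))
    simp only [List.map_cons] at this
    rw [this]
    simp

-- single-space split lemmas (sF ' ' [])
theorem sF1_code (c : List Char) (hc : ' ' ∉ c) : sF ' ' [] c = [c] := by
  match c with
  | [] => simp [sF]
  | x :: t =>
    have hx : x ≠ ' ' := fun h => hc (by simp [h])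
    rw [sF]
    have : ([' '] : List Char).isPrefixOf (x :: t) = false := by
      simp [List.isPrefixOf]; exact fun h => absurd h.symm hx
    simp only [this, Bool.false_eq_true, if_false]
    rw [sF1_code t (fun h => hc (by simp [h]))]
    simp [List.modifyHead]

theorem sF1_code_space (c : List Char) (r : List Char) (hc : ' ' ∉ c) :
    sF ' ' [] (c ++ ' ' :: r) = c :: sF ' ' [] r := by
  match c with
  | [] =>
    rw [List.nil_append, sF]
    simp [List.isPrefixOf]
  | x :: t =>
    have hx : x ≠ ' ' := fun h => hc (by simp [h])
    rw [List.cons_append, sF]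
    have : ([' '] : List Char).isPrefixOf (x :: (t ++ ' ' :: r)) = false := by
      simp [List.isPrefixOf]; exact fun h => absurd h.symm hx
    simp only [this, Bool.false_eq_true, if_false]
    rw [sF1_code_space t r (fun h => hc (by simp [h]))]
    simp [List.modifyHead]

theorem sF1_word (cs : List (List Char)) (r : List Char)
    (hne : cs ≠ []) (hg : ∀ c ∈ cs, ' ' ∉ c) :
    sF ' ' [] (jn [' '] cs ++ ' ' :: r) = cs ++ sF ' ' [] r := by
  match cs with
  | [c] =>
    rw [jn, sF1_code_space c r (hg c (by simp))]
    simp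
  | c :: c' :: t =>
    rw [jn]
    rw [List.append_assoc, List.append_assoc, List.singleton_append, List.cons_append,
      sF1_code_space c _ (hg c (by simp))]
    rw [sF1_word (c' :: t) r (by simp) (fun x hx => hg x (by simp at hx; rcases hx with h | h <;> simp [h]))]

theorem sF1_word0 (cs : List (List Char)) (hne : cs ≠ []) (hg : ∀ c ∈ cs, ' ' ∉ c) :
    sF ' ' [] (jn [' '] cs) = cs := by
  match cs with
  | [c] => rw [jn, sF1_code c (hg c (by simp))]
  | c :: c' :: t =>
    rw [jn, List.append_assoc, List.singleton_append,
      sF1_code_space c _ (hg c (by simp))]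
    rw [sF1_word0 (c' :: t) (by simp) (fun x hx => hg x (by simp at hx; rcases hx with h | h <;> simp [h]))]

-- token shape of A's flat split
def jnT : List (List (List Char)) → List (List Char)
  | [] => []
  | [cs] => cs
  | cs :: t => cs ++ ['*'] :: jnT t

theorem sF1_tokens (cs0 : List (List Char)) (css : List (List (List Char)))
    (hg : ∀ cs ∈ cs0 :: css, cs ≠ [] ∧ ∀ c ∈ cs, ' ' ∉ c) :
    sF ' ' [] (jn [' ', '*', ' '] ((cs0 :: css).map (jn [' '])))
      = jnT (cs0 :: css) := by
  match css with
  | [] =>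
    simp only [List.map_cons, List.map_nil]
    rw [jn, jnT, sF1_word0 cs0 (hg cs0 (by simp)).1 (hg cs0 (by simp)).2]
  | cs1 :: t =>
    simp only [List.map_cons]
    rw [jn]
    rw [List.append_assoc]
    rw [show ([' ', '*', ' '] : List Char) ++ jn [' ', '*', ' '] (jn [' '] cs1 :: t.map (jn [' ']))
        = ' ' :: ('*' :: ' ' :: jn [' ', '*', ' '] (jn [' '] cs1 :: t.map (jn [' ']))) by simp]
    rw [sF1_word cs0 _ (hg cs0 (by simp)).1 (hg cs0 (by simp)).2]
    rw [show ('*' :: ' ' :: jn [' ', '*', ' '] (jn [' '] cs1 :: t.map (jn [' '])))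
        = ['*'] ++ ' ' :: jn [' ', '*', ' '] (jn [' '] cs1 :: t.map (jn [' '])) by simp]
    rw [sF1_code_space ['*'] _ (by simp)]
    have := sF1_tokens cs1 t (fun cs hcs => hg cs (by simp at hcs; rcases hcs with h | h <;> simp [h]))
    simp only [List.map_cons] at this
    rw [this]
    rw [show jnT (cs0 :: cs1 :: t) = cs0 ++ ['*'] :: jnT (cs1 :: t) from rfl]

-- per-code facts, by decide over the 36 codes: each valid code is nonempty, space- and
-- star-free, and B's tree decode agrees with A's dict scan on it
set_option maxRecDepth 8192 in
theorem pv_code_facts : ∀ c ∈ pvMorsePairs.map (fun kv => kv.2),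
    c ≠ [] ∧ ' ' ∉ c ∧ (c == ['*']) = false ∧
      [pvTreeDecode c] = (decoding_character c).getD [] := by decide

-- A's loop over the tokens, as flatMap
theorem pv_fold_eq_flatMap (T : List (List Char)) :
    T.foldl (fun result i =>
      if i == ['*'] then result ++ [' ']
      else result ++ (decoding_character i).getD []) []
    = T.flatMap (fun i => if i == ['*'] then [' '] else (decoding_character i).getD []) := by
  have : (fun (result : List Char) (i : List Char) =>
      if i == ['*'] then result ++ [' ']
      else result ++ (decoding_character i).getD [])
      = fun result i => result ++ (if i == ['*'] then [' '] else (decoding_character i).getD []) := by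
    funext result i
    split <;> rfl
  rw [this, PySem.List.foldl_append_eq_flatMap]
  simp

-- decoding the token list
theorem pv_decode_tokens (cs0 : List (List Char)) (css : List (List (List Char)))
    (hg : ∀ cs ∈ cs0 :: css, ∀ c ∈ cs, c ∈ pvMorsePairs.map (fun kv => kv.2)) :
    (jnT (cs0 :: css)).flatMap
        (fun i => if i == ['*'] then [' '] else (decoding_character i).getD [])
      = jn [' '] ((cs0 :: css).map (fun cs =>
          (cs.map (fun code => [pvTreeDecode code])).flatten)) := by
  have hcode : ∀ (cs : List (List Char)), (∀ c ∈ cs, c ∈ pvMorsePairs.map (fun kv => kv.2)) → cs.flatMap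
      (fun i => if i == ['*'] then [' '] else (decoding_character i).getD [])
      = (cs.map (fun code => [pvTreeDecode code])).flatten := by
    intro cs hcs
    rw [List.flatMap_def]
    congr 1
    apply List.map_congr_left
    intro c hc
    obtain ⟨-, -, hstar, hdec⟩ := pv_code_facts c (hcs c hc)
    rw [hstar, ← hdec]
    simp
  match css with
  | [] =>
    simp only [List.map_cons, List.map_nil]
    rw [show jnT [cs0] = cs0 from rfl, jn]
    exact hcode cs0 (hg cs0 (by simp))
  | cs1 :: t =>
    rw [show jnT (cs0 :: cs1 :: t) = cs0 ++ ['*'] :: jnT (cs1 :: t) from rfl]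
    rw [List.flatMap_append]
    rw [show (['*'] :: jnT (cs1 :: t)).flatMap
        (fun i => if i == ['*'] then [' '] else (decoding_character i).getD [])
      = [' '] ++ (jnT (cs1 :: t)).flatMap
        (fun i => if i == ['*'] then [' '] else (decoding_character i).getD []) by
        rw [List.flatMap_cons]; rfl]
    rw [pv_decode_tokens cs1 t (fun cs hcs => hg cs (by simp at hcs; rcases hcs with h | h <;> simp [h]))]
    rw [hcode cs0 (hg cs0 (by simp))]
    simp only [List.map_cons]
    rw [jn]
    simp

-- final assembly
theorem pv_main (s : String) (hpre : Pre_decoding_sentence s) :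
    decoding_sentence s = decoding_sentence_alt s := by
  unfold decoding_sentence decoding_sentence_alt
  unfold Pre_decoding_sentence at hpre
  rw [sOn_eq ' ' [' '] s.toList] at hpre ⊢
  simp only [sOn_eq ' ' []] at hpre ⊢
  cases hws : sF ' ' [' '] s.toList with
  | nil => exact absurd hws (sF_ne_nil _ _ _)
  | cons w0 ws =>
    rw [hws] at hpre
    have hw : ∀ w ∈ w0 :: ws, w = jn [' '] (sF ' ' [] w) := by
      intro w _
      exact (sF_join ' ' [] w).symm
    have hchars : s.toList = jn [' ', ' '] ((w0 :: ws).map (fun w => jn [' '] (sF ' ' [] w))) := by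
      conv_lhs => rw [← sF_join ' ' [' '] s.toList, hws]
      congr 1
      conv_lhs => rw [show w0 :: ws = List.map id (w0 :: ws) by simp]
      apply List.map_congr_left
      intro w hwmem
      exact hw w hwmem
    have hcss : ∀ cs ∈ (sF ' ' [] w0) :: ws.map (sF ' ' []), cs ≠ [] ∧
        ∀ c ∈ cs, c ∈ pvMorsePairs.map (fun kv => kv.2) := by
      intro cs hcs
      simp only [List.mem_cons, List.mem_map] at hcs
      rcases hcs with h | ⟨w, hw', rfl⟩
      · subst h; exact ⟨sF_ne_nil _ _ _, hpre w0 (by simp)⟩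
      · exact ⟨sF_ne_nil _ _ _, hpre w (by simp [hw'])⟩
    -- A side
    rw [repl_eq, hchars]
    rw [show (w0 :: ws).map (fun w => jn [' '] (sF ' ' [] w))
        = ((sF ' ' [] w0) :: ws.map (sF ' ' [])).map (jn [' ']) by
        simp [List.map_map, Function.comp_def]]
    rw [rF_sentence _ _ (fun cs hcs => ⟨(hcss cs hcs).1, fun c hc =>
      ⟨(pv_code_facts c ((hcss cs hcs).2 c hc)).1, (pv_code_facts c ((hcss cs hcs).2 c hc)).2.1⟩⟩)]
    rw [sF1_tokens _ _ (fun cs hcs => ⟨(hcss cs hcs).1, fun c hc =>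
      (pv_code_facts c ((hcss cs hcs).2 c hc)).2.1⟩)]
    rw [pv_fold_eq_flatMap]
    rw [pv_decode_tokens _ _ (fun cs hcs => (hcss cs hcs).2)]
    -- B side
    rw [join_eq_jn]
    have hB : ∀ (word : List Char), PySem.Chars.join []
        ((sF ' ' [] word).map (fun code => [pvTreeDecode code]))
        = ((sF ' ' [] word).map (fun code => [pvTreeDecode code])).flatten := by
      intro word
      rw [join_eq_jn, jn_nil_flatten]
    simp only [hB]
    congr 1
    simp [List.map_map, Function.comp_def]

-- ===== VERDICT (by name: the statement is the Claim_ definition above) =====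
theorem decoding_sentence_spec : Claim_equal_decoding_sentence := by
  intro morse_sentence _ hpre
  unfold Spec_decoding_sentence
  exact pv_main morse_sentence hpre
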